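-- pv_equiv track=rewrite | github.com/ginn1111/CD-CN-PM-Information-Retrival | BT_Tuan2/N19DCCN204_N19DCCN126_N19DCCN136.py | re_processing_docs
-- ===== SOURCE A (Python) =====
-- import string
--
-- def re_processing_docs(docs):
--     processed_docs = []
--     # removing digit and break line ('\n)
--     st1_pr_docs = list(filter(lambda y: not y.isdigit(), map(lambda x: x[:-1], docs)))
--     # splitting allow forward flash
--     table_remove_punctuation = str.maketrans(dict.fromkeys(string.punctuation))
--     docs_tmp = []
--     for doc in st1_pr_docs:
--         if doc.endswith("/"):
--             processed_docs.append(" ".join(docs_tmp))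
--             docs_tmp.clear()
--         else:
--             docs_tmp.append(" ".join([w.lower().translate(table_remove_punctuation) for w in doc.split()]))
--     return processed_docs
-- ===== SOURCE B (Python) =====
-- import string
--
-- _PUNCT = set(string.punctuation)
--
--
-- def _norm_line(line):
--     return " ".join(
--         "".join(c for c in w.lower() if c not in _PUNCT) for w in line.split()
--     )
--
--
-- def re_processing_docs(docs):
--     # phase 1: strip the last character of every line, drop pure-digit lines
--     stripped = [x[:-1] for x in docs]
--     cleaned = [y for y in stripped if not y.isdigit()]
--     # phase 2: repeatedly split off the block before the first '/'-terminated
--     # line; lines after the last delimiter are discarded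
--     out = []
--     while True:
--         j = next((i for i, line in enumerate(cleaned) if line.endswith("/")), None)
--         if j is None:
--             return out
--         out.append(" ".join(_norm_line(line) for line in cleaned[:j]))
--         cleaned = cleaned[j + 1:]
-- ===== Notes on version B (the rewrite author's own statement) =====
-- stated objective: alternative
-- what changed: A interleaves normalization and grouping in one accumulate-and-flush loop over the cleaned lines; B first cleans the lines, then repeatedly finds the first '/'-terminated line and slices off the block before it (dropping an unterminated tail), normalizing each block's lines with a per-character punctuation-set filter only when the block is emitted.
import Mathlib
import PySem

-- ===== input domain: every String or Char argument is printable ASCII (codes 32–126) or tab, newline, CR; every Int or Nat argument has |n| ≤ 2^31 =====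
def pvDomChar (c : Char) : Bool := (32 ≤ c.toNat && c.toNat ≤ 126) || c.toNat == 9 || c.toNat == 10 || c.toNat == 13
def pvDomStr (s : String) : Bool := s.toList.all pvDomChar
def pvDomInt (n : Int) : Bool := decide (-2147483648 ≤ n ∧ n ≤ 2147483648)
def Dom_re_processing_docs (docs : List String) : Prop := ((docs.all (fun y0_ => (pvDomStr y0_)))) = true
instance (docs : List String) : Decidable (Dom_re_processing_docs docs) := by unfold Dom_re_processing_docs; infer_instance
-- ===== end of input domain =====

-- B replaces A's interleaved accumulate-and-flush loop by a two-phase "segment at the first '/'-terminated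
-- line, then normalize" recursion (objective: alternative decomposition, same cost).

-- ===== PORT A =====
-- string.punctuation
def pvPunctA : List Char := "!\"#$%&'()*+,-./:;<=>?@[\\]^_`{|}~".toList

-- hand port of s.translate(str.maketrans(dict.fromkeys(string.punctuation))): the table only DELETES
-- the punctuation characters, so it is exactly a filter over the code points (exact on all inputs)
def pvTranslateA (s : String) : String := String.ofList (s.toList.filter (fun c => !pvPunctA.contains c))

def pvNormA (doc : String) : String :=
  PySem.Str.join " " ((PySem.Str.split₀ doc).map (fun w => pvTranslateA (PySem.Str.lower w)))

def re_processing_docs (docs : List String) : List String :=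
  let st1 : List String :=
    (docs.map (fun x => PySem.Str.slice x none (some (-1)))).filter
      (fun y => !PySem.Str.strIsdigit y)
  (st1.foldl
    (fun (st : List String × List String) doc =>
      if PySem.Str.endswith doc "/" then (st.1 ++ [PySem.Str.join " " st.2], [])
      else (st.1, st.2 ++ [pvNormA doc]))
    ([], [])).1

-- ===== PORT B =====
-- set(string.punctuation)
def pvPunctB : List Char := PySem.Set.ofList "!\"#$%&'()*+,-./:;<=>?@[\\]^_`{|}~".toList

-- "".join(c for c in w.lower() if c not in _PUNCT): a filter over the code points (exact on all inputs)
def pvNormB (line : String) : String :=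
  PySem.Str.join " "
    ((PySem.Str.split₀ line).map
      (fun w => String.ofList ((PySem.Str.lower w).toList.filter (fun c => !pvPunctB.contains c))))

-- the while-loop of B: find the first '/'-terminated line, emit the block before it, continue after it
def pvBLoop (cleaned : List String) : List String :=
  match h : cleaned.findIdx? (fun line => PySem.Str.endswith line "/") with
  | none => []
  | some j =>
      PySem.Str.join " " ((cleaned.take j).map pvNormB) :: pvBLoop (cleaned.drop (j + 1))
termination_by cleaned.length
decreasing_by
  have hj : j < cleaned.length := (List.findIdx?_eq_some_iff_findIdx_eq.mp h).1
  simp [List.length_drop]; omega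

def re_processing_docs_alt (docs : List String) : List String :=
  let stripped : List String := docs.map (fun x => PySem.Str.slice x none (some (-1)))
  let cleaned : List String := stripped.filter (fun y => !PySem.Str.strIsdigit y)
  pvBLoop cleaned

-- ===== PRECONDITION & SPEC =====
def Spec_re_processing_docs (docs : List String) (out : List String) : Prop := out = re_processing_docs_alt docs
instance (docs : List String) (out : List String) : Decidable (Spec_re_processing_docs docs out) := by unfold Spec_re_processing_docs; infer_instance

-- ===== CLAIM (what is proved, stated in full; the proofs are below) =====
def Claim_equal_re_processing_docs : Prop := ∀ (docs : List String), Dom_re_processing_docs docs → Spec_re_processing_docs docs (re_processing_docs docs)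

-- ===== LEMMAS AND PROOFS =====

theorem pvPunct_eq : pvPunctB = pvPunctA := by decide

theorem pvNorm_eq (doc : String) : pvNormA doc = pvNormB doc := by
  simp [pvNormA, pvNormB, pvTranslateA, pvPunct_eq]

-- A's loop step
def pvStepA (st : List String × List String) (doc : String) : List String × List String :=
  if PySem.Str.endswith doc "/" then (st.1 ++ [PySem.Str.join " " st.2], [])
  else (st.1, st.2 ++ [pvNormA doc])

theorem pvFoldA_acc (l : List String) (p t : List String) :
    (l.foldl pvStepA (p, t)).1 = p ++ (l.foldl pvStepA ([], t)).1 := by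
  induction l generalizing p t with
  | nil => simp
  | cons d r ih =>
      simp only [List.foldl_cons, pvStepA]
      by_cases hd : PySem.Str.endswith d "/" = true
      · simp only [if_pos hd]
        rw [ih (p ++ [PySem.Str.join " " t]) [], ih ([] ++ [PySem.Str.join " " t]) []]
        simp
      · simp only [if_neg hd]
        exact ih p (t ++ [pvNormA d])

theorem pvBLoop_none {l : List String}
    (h : l.findIdx? (fun line => PySem.Str.endswith line "/") = none) : pvBLoop l = [] := by
  rw [pvBLoop]
  split
  · rfl
  · next j heq => rw [h] at heq; cases heq

theorem pvBLoop_some {l : List String} {j : Nat}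
    (h : l.findIdx? (fun line => PySem.Str.endswith line "/") = some j) :
    pvBLoop l = PySem.Str.join " " ((l.take j).map pvNormB) :: pvBLoop (l.drop (j + 1)) := by
  rw [pvBLoop]
  split
  · next heq => rw [h] at heq; cases heq
  · next j' heq =>
      rw [h] at heq
      injection heq with hj
      subst hj
      rfl

theorem pvFoldA_eq_bloop (l : List String) (t : List String) :
    (l.foldl pvStepA ([], t)).1 =
      match l.findIdx? (fun line => PySem.Str.endswith line "/") with
      | none => []
      | some j =>
          PySem.Str.join " " ((t ++ (l.take j).map pvNormB)) :: pvBLoop (l.drop (j + 1)) := by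
  induction l generalizing t with
  | nil => simp
  | cons d r ih =>
      simp only [List.foldl_cons, pvStepA, List.findIdx?_cons]
      by_cases hd : PySem.Str.endswith d "/" = true
      · simp only [if_pos hd]
        rw [pvFoldA_acc r ([] ++ [PySem.Str.join " " t]) [], ih []]
        cases hr : r.findIdx? (fun line => PySem.Str.endswith line "/") with
        | none => simp [pvBLoop_none hr]
        | some j => simp [pvBLoop_some hr]
      · simp only [if_neg hd]
        rw [ih (t ++ [pvNormA d])]
        cases hr : r.findIdx? (fun line => PySem.Str.endswith line "/") with
        | none => simp
        | some j => simp [pvNorm_eq]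

-- ===== VERDICT (by name: the statement is the Claim_ definition above) =====
theorem re_processing_docs_spec : Claim_equal_re_processing_docs := by
  intro docs _
  unfold Spec_re_processing_docs re_processing_docs re_processing_docs_alt
  show (List.foldl pvStepA ([], []) _).1 = _
  rw [pvFoldA_eq_bloop]
  cases hr :
      (List.filter (fun y => !PySem.Str.strIsdigit y)
        (docs.map (fun x => PySem.Str.slice x none (some (-1))))).findIdx?
        (fun line => PySem.Str.endswith line "/") with
  | none => exact (pvBLoop_none hr).symm
  | some j => simp only [List.nil_append]; exact (pvBLoop_some hr).symm
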